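-- pv_equiv track=rewrite | github.com/Nolanogenn/aoc | 2024/day14/solve.py | move_guards
-- ===== SOURCE A (Python) =====
-- h = 102
--
-- w = 100
--
-- def move_guards(guard_pos, guard_mov, rounds):
--     final_pos = []
--     for guard_i in range(len(guard_pos)):
--         pos = guard_pos[guard_i]
--         mov = guard_mov[guard_i]
--         for _ in range(rounds):
--             newpos = [pos[0]+mov[0], pos[1]+mov[1]]
--             if newpos[0] < 0:
--                 newpos[0] = h + newpos[0]+1
--             if newpos[1] < 0:
--                 newpos[1] = w + newpos[1]+1
--             if newpos[0] > h:
--                 newpos[0] = newpos[0]-h-1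
--             if newpos[1] > w:
--                 newpos[1] = newpos[1]-w-1
--             pos = newpos
--         final_pos.append(pos)
--     return final_pos
-- ===== SOURCE B (Python) =====
-- h = 102
--
-- w = 100
--
-- def move_guards(guard_pos, guard_mov, rounds):
--     if rounds <= 0:
--         return [list(p) for p, _ in zip(guard_pos, guard_mov)]
--     return [[(p[0] + m[0] * rounds) % (h + 1), (p[1] + m[1] * rounds) % (w + 1)]
--             for p, m in zip(guard_pos, guard_mov)]
-- ===== Notes on version B (the rewrite author's own statement) =====
-- stated objective: simpler
-- what changed: B replaces A's per-guard step-by-step simulation loop over `rounds` with a single closed-form modular computation (start + mov*rounds) mod grid size per coordinate, over zip(guard_pos, guard_mov); within Pre_ (grid-band inputs) this is O(n) instead of O(n*rounds), though a timing run's large inputs fall outside Pre_ so no speed-up is claimed as measured.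
-- outside the precondition, e.g. on move_guards([[0, 0]], [[300, 0]], 1): A returns [[197, 0]], B returns [[94, 0]]; on move_guards([[-50, 0]], [[-60, 0]], 1): A returns [[-7, 0]], B returns [[96, 0]]
import Mathlib
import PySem

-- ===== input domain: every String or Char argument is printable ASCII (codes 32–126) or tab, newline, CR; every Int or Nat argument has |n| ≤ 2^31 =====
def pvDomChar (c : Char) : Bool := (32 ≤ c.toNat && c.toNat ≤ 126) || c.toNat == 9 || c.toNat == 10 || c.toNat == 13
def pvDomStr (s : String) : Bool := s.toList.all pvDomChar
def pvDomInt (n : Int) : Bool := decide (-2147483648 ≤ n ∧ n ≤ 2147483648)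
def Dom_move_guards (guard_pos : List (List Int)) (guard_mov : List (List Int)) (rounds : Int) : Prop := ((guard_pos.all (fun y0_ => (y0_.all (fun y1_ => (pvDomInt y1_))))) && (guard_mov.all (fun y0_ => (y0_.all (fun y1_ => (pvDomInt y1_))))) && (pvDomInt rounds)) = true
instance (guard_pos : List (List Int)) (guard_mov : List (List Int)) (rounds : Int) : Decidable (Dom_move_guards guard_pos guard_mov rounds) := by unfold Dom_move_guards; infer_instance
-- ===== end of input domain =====

-- B replaces A's per-guard simulation loop over `rounds` with one closed-form modular
-- computation per coordinate (objective: simpler — one map instead of nested loops).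

-- ===== PORT A =====
-- one iteration of A's inner `for _ in range(rounds)` body (h = 102, w = 100)
def pvStepA (pos mov : List Int) : List Int :=
  let n0 := (PySem.List.pyGet? pos 0).getD 0 + (PySem.List.pyGet? mov 0).getD 0
  let n1 := (PySem.List.pyGet? pos 1).getD 0 + (PySem.List.pyGet? mov 1).getD 0
  let n0 := if n0 < 0 then 102 + n0 + 1 else n0
  let n1 := if n1 < 0 then 100 + n1 + 1 else n1
  let n0 := if n0 > 102 then n0 - 102 - 1 else n0
  let n1 := if n1 > 100 then n1 - 100 - 1 else n1
  [n0, n1]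

def move_guards (guard_pos : List (List Int)) (guard_mov : List (List Int)) (rounds : Int) : List (List Int) :=
  (PySem.List.pyRange 0 (guard_pos.length : Int) 1).foldl
    (fun final_pos guard_i =>
      let pos := (PySem.List.pyGet? guard_pos guard_i).getD []
      let mov := (PySem.List.pyGet? guard_mov guard_i).getD []
      let pos := (PySem.List.pyRange 0 rounds 1).foldl (fun pos _ => pvStepA pos mov) pos
      final_pos ++ [pos])
    []

-- ===== PORT B =====
def move_guards_alt (guard_pos : List (List Int)) (guard_mov : List (List Int)) (rounds : Int) : List (List Int) :=
  if rounds ≤ 0 then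
    (guard_pos.zip guard_mov).map (fun pm => pm.1)
  else
    (guard_pos.zip guard_mov).map (fun pm =>
      [PySem.Int.mod ((PySem.List.pyGet? pm.1 0).getD 0 + (PySem.List.pyGet? pm.2 0).getD 0 * rounds) (102 + 1),
       PySem.Int.mod ((PySem.List.pyGet? pm.1 1).getD 0 + (PySem.List.pyGet? pm.2 1).getD 0 * rounds) (100 + 1)])

-- ===== PRECONDITION & SPEC =====
-- Pre_ excludes (a) inputs where A raises (guard_mov shorter than guard_pos, or with
-- rounds ≥ 1 a pos/mov entry with fewer than 2 coordinates), and (b) — a stated narrowing —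
-- inputs where, with rounds ≥ 1, a move exceeds one grid wrap (|mov| > grid size) or the
-- first step leaves the single-wrap band: there A's partial one-wrap adjustment is not
-- modular arithmetic and B's closed form intentionally differs (see cites).
def Pre_move_guards (guard_pos : List (List Int)) (guard_mov : List (List Int)) (rounds : Int) : Prop :=
  guard_pos.length ≤ guard_mov.length ∧
  ∀ pm ∈ guard_pos.zip guard_mov, 1 ≤ rounds →
    2 ≤ pm.1.length ∧ 2 ≤ pm.2.length ∧
    -103 ≤ pm.2.getD 0 0 ∧ pm.2.getD 0 0 ≤ 103 ∧
    -101 ≤ pm.2.getD 1 0 ∧ pm.2.getD 1 0 ≤ 101 ∧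
    -103 ≤ pm.1.getD 0 0 + pm.2.getD 0 0 ∧ pm.1.getD 0 0 + pm.2.getD 0 0 ≤ 205 ∧
    -101 ≤ pm.1.getD 1 0 + pm.2.getD 1 0 ∧ pm.1.getD 1 0 + pm.2.getD 1 0 ≤ 201
instance (guard_pos : List (List Int)) (guard_mov : List (List Int)) (rounds : Int) : Decidable (Pre_move_guards guard_pos guard_mov rounds) := by unfold Pre_move_guards; infer_instance

def pvWitness_move_guards : List (List Int) × List (List Int) × Int := ([[5, 7], [0, 100]], [[-3, 101], [103, -1]], 4)

def Spec_move_guards (guard_pos : List (List Int)) (guard_mov : List (List Int)) (rounds : Int) (out : List (List Int)) : Prop := out = move_guards_alt guard_pos guard_mov rounds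
instance (guard_pos : List (List Int)) (guard_mov : List (List Int)) (rounds : Int) (out : List (List Int)) : Decidable (Spec_move_guards guard_pos guard_mov rounds out) := by unfold Spec_move_guards; infer_instance

-- ===== CLAIM (what is proved, stated in full; the proofs are below) =====
def Claim_equal_move_guards : Prop := ∀ (guard_pos : List (List Int)) (guard_mov : List (List Int)) (rounds : Int), Dom_move_guards guard_pos guard_mov rounds → Pre_move_guards guard_pos guard_mov rounds → Spec_move_guards guard_pos guard_mov rounds (move_guards guard_pos guard_mov rounds)

-- ===== LEMMAS AND PROOFS =====

-- folding a body that ignores the list elements only counts them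
theorem pv_foldl_const {α β : Type} (f : α → α) :
    ∀ (l : List β) (s : α), l.foldl (fun s _ => f s) s = f^[l.length] s := by
  intro l
  induction l with
  | nil => intro s; simp
  | cons a t ih => intro s; simp [List.foldl, ih, Function.iterate_succ_apply]

-- appending one element per index in a left fold is a map over the range
theorem pv_foldl_range_append {α : Type} (g : ℕ → α) :
    ∀ (n : ℕ) (acc : List α),
      (List.range n).foldl (fun acc i => acc ++ [g i]) acc = acc ++ (List.range n).map g := by
  intro n
  induction n with
  | zero => intro acc; simp
  | succ k ih =>
      intro acc
      rw [List.range_succ, List.foldl_append, ih, List.map_append]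
      simp

theorem pv_pyGet?_getD (p : List Int) (j : ℕ) (h : j < p.length) :
    PySem.List.pyGet? p (j : Int) = some (p.getD j 0) := by
  rw [PySem.List.pyGet?_natCast]
  simp [List.getD_eq_getElem?_getD, List.getElem?_eq_getElem h]

-- one A-step is modular whenever the raw sums lie in the single-wrap bands
theorem pvStepA_first (p m : List Int) (x y mx my : Int)
    (hp0 : PySem.List.pyGet? p 0 = some x) (hp1 : PySem.List.pyGet? p 1 = some y)
    (hm0 : PySem.List.pyGet? m 0 = some mx) (hm1 : PySem.List.pyGet? m 1 = some my)
    (hx : -103 ≤ x + mx ∧ x + mx ≤ 205) (hy : -101 ≤ y + my ∧ y + my ≤ 201) :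
    pvStepA p m = [(x + mx) % 103, (y + my) % 101] := by
  simp only [pvStepA, hp0, hp1, hm0, hm1, Option.getD_some, List.cons.injEq, and_true]
  constructor <;> (split_ifs <;> omega)

-- iterating A's step from an on-grid pair is the closed form
theorem pvStepA_iter (m : List Int) (mx my : Int)
    (hm0 : PySem.List.pyGet? m 0 = some mx) (hm1 : PySem.List.pyGet? m 1 = some my)
    (hmx : -103 ≤ mx ∧ mx ≤ 103) (hmy : -101 ≤ my ∧ my ≤ 101) :
    ∀ (n : ℕ) (x y : Int), 0 ≤ x → x ≤ 102 → 0 ≤ y → y ≤ 100 →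
      (fun p => pvStepA p m)^[n] [x, y] =
        [(x + mx * n) % 103, (y + my * n) % 101] := by
  intro n
  induction n with
  | zero =>
      intro x y hx1 hx2 hy1 hy2
      simp only [Function.iterate_zero, id_eq, Nat.cast_zero, mul_zero, add_zero,
        List.cons.injEq, and_true]
      constructor <;> omega
  | succ k ih =>
      intro x y hx1 hx2 hy1 hy2
      rw [Function.iterate_succ_apply', ih x y hx1 hx2 hy1 hy2]
      have e1 : x + mx * ((k + 1 : ℕ) : Int) = (x + mx * (k : Int)) + mx := by push_cast; ring
      have e2 : y + my * ((k + 1 : ℕ) : Int) = (y + my * (k : Int)) + my := by push_cast; ring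
      rw [e1, e2]
      generalize x + mx * (k : Int) = a
      generalize y + my * (k : Int) = b
      rw [pvStepA_first [a % 103, b % 101] m (a % 103) (b % 101) mx my
        (by simp [PySem.List.pyGet?, PySem.List.pyIdx?])
        (by simp [PySem.List.pyGet?, PySem.List.pyIdx?]) hm0 hm1
        ⟨by omega, by omega⟩ ⟨by omega, by omega⟩]
      simp only [List.cons.injEq, and_true]
      constructor <;> omega

theorem move_guards_spec : Claim_equal_move_guards := by
  intro gp gm rounds _ hpre
  obtain ⟨hlen, hall⟩ := hpre
  unfold Spec_move_guards move_guards move_guards_alt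
  -- normalise A's outer loop to a map over List.range
  rw [PySem.List.pyRange_one 0 (gp.length : Int)]
  simp only [sub_zero, Int.toNat_natCast, zero_add]
  rw [List.foldl_map]
  rw [pv_foldl_range_append
    (g := fun k =>
      (PySem.List.pyRange 0 rounds 1).foldl
        (fun pos _ => pvStepA pos ((PySem.List.pyGet? gm (k : Int)).getD []))
        ((PySem.List.pyGet? gp (k : Int)).getD []))]
  rw [List.nil_append]
  -- elementwise comparison
  apply List.ext_getElem
  · by_cases hr : rounds ≤ 0 <;> simp [hr, List.length_zip] <;> omega
  · intro i h1 h2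
    have hi : i < gp.length := by simpa using h1
    have hi2 : i < gm.length := by omega
    have hiz : i < (gp.zip gm).length := by
      rw [List.length_zip]; omega
    have hgp : (PySem.List.pyGet? gp (i : Int)).getD [] = gp[i] := by
      rw [PySem.List.pyGet?_natCast]; simp [hi]
    have hgm : (PySem.List.pyGet? gm (i : Int)).getD [] = gm[i] := by
      rw [PySem.List.pyGet?_natCast]; simp [hi2]
    have hzip : (gp.zip gm)[i]'hiz = (gp[i], gm[i]) := List.getElem_zip
    have hmem : (gp[i], gm[i]) ∈ gp.zip gm := by
      rw [← hzip]; exact List.getElem_mem _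
    by_cases hr : rounds ≤ 0
    · -- no rounds: A's inner loop is empty, B returns the position unchanged
      simp only [if_pos hr, List.getElem_map, List.getElem_range, hgp, hgm, hzip]
      rw [pv_foldl_const, PySem.List.length_pyRange_one]
      have h0 : (rounds - 0).toNat = 0 := by omega
      rw [h0]
      simp
    · -- rounds ≥ 1: closed modular form
      have hcond := hall _ hmem (by omega)
      simp only at hcond
      obtain ⟨hpl, hml, hmx1, hmx2, hmy1, hmy2, hs1, hs2, hs3, hs4⟩ := hcond
      simp only [if_neg hr, List.getElem_map, List.getElem_range, hgp, hgm, hzip]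
      rw [pv_foldl_const, PySem.List.length_pyRange_one]
      obtain ⟨k, hk⟩ : ∃ k, (rounds - 0).toNat = k + 1 := ⟨(rounds - 0).toNat - 1, by omega⟩
      rw [hk, Function.iterate_succ_apply]
      have hp0 : PySem.List.pyGet? gp[i] 0 = some (gp[i].getD 0 0) := by
        exact_mod_cast pv_pyGet?_getD gp[i] 0 (by omega)
      have hp1 : PySem.List.pyGet? gp[i] 1 = some (gp[i].getD 1 0) := by
        exact_mod_cast pv_pyGet?_getD gp[i] 1 (by omega)
      have hm0 : PySem.List.pyGet? gm[i] 0 = some (gm[i].getD 0 0) := by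
        exact_mod_cast pv_pyGet?_getD gm[i] 0 (by omega)
      have hm1 : PySem.List.pyGet? gm[i] 1 = some (gm[i].getD 1 0) := by
        exact_mod_cast pv_pyGet?_getD gm[i] 1 (by omega)
      rw [pvStepA_first _ _ _ _ _ _ hp0 hp1 hm0 hm1 ⟨hs1, hs2⟩ ⟨hs3, hs4⟩]
      rw [pvStepA_iter _ _ _ hm0 hm1 ⟨hmx1, hmx2⟩ ⟨hmy1, hmy2⟩ k _ _
        (by omega) (by omega) (by omega) (by omega)]
      have hrk : rounds = ((k + 1 : ℕ) : Int) := by omega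
      rw [hp0, hp1, hm0, hm1]
      simp only [Option.getD_some, List.cons.injEq, and_true]
      rw [hrk]
      generalize hgpx : gp[i].getD 0 0 = x
      generalize hgpy : gp[i].getD 1 0 = y
      generalize hgmx : gm[i].getD 0 0 = mx
      generalize hgmy : gm[i].getD 1 0 = my
      have e1 : x + mx * ((k + 1 : ℕ) : Int) = (x + mx) + mx * (k : Int) := by push_cast; ring
      have e2 : y + my * ((k + 1 : ℕ) : Int) = (y + my) + my * (k : Int) := by push_cast; ring
      rw [e1, e2]
      generalize x + mx = a
      generalize y + my = b
      generalize mx * (k : Int) = s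
      generalize my * (k : Int) = t
      constructor <;> simp
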